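-- pv_equiv track=rewrite | github.com/KimHyungkeun/AlgoPractice | 프로그래머스/레벨0/한번만등장하는문자.py | solution
-- ===== SOURCE A (Python) =====
-- def solution(s):
--     answer = ''
--     cnt_dict = {}
--     result = []
--
--     for w in s :
--         if w not in cnt_dict :
--             cnt_dict[w] = 1
--         else :
--             cnt_dict[w] += 1
--
--     str_list = sorted(cnt_dict.items(), key = lambda item : item[1], reverse=True)
--
--     while str_list :
--         if str_list[-1][1] == 1 :
--             result.append(str_list.pop())
--         else :
--             break
--
--     result.sort(key = lambda x : x[0])
--     for r in result :
--         answer += r[0]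
--
--     return answer
-- ===== SOURCE B (Python) =====
-- def solution(s):
--     counts = {}
--     for w in s:
--         counts[w] = counts.get(w, 0) + 1
--     return ''.join(sorted(c for c in counts if counts[c] == 1))
-- ===== Notes on version B (the rewrite author's own statement) =====
-- stated objective: simpler
-- what changed: Replaces A's sort-by-count-descending plus while-pop-from-end loop plus second sort with a single filter of the count map for count==1 keys followed by one alphabetical sort and a join.
import Mathlib
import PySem

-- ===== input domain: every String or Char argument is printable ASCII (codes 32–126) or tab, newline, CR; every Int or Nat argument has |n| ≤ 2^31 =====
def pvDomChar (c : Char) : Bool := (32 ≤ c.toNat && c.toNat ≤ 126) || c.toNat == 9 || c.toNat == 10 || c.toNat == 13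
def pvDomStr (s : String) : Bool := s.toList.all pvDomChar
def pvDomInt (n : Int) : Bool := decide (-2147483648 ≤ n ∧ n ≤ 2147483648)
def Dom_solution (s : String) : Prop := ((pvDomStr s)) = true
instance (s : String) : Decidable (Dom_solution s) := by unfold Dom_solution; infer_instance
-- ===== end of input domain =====

-- B drops A's count-descending sort and the while-pop loop, directly filtering the count map for
-- count == 1 and sorting those characters once (objective: simpler; return values proved equal).

-- ===== PORT A =====
-- the 'while str_list: if str_list[-1][1] == 1: result.append(str_list.pop()) else: break' loop
def pvPopLoop (strList result : List (Char × Int)) : List (Char × Int) × List (Char × Int) :=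
  match h : strList.getLast? with
  | none => (strList, result)
  | some last =>
    if last.2 == 1 then pvPopLoop strList.dropLast (result ++ [last])
    else (strList, result)
termination_by strList.length
decreasing_by
  have hne : strList ≠ [] := by
    intro hn; rw [hn] at h; simp at h
  have hl : 0 < strList.length := List.length_pos_iff.mpr hne
  simp only [List.length_dropLast]; omega

def solution (s : String) : String :=
  let cntDict : PySem.Dict Char Int :=
    s.toList.foldl (fun d w =>
      if d.contains w = false then d.insert w 1 else d.modify w 0 (· + 1))
      PySem.Dict.empty
  let strList := PySem.List.sorted cntDict.items (fun item => item.2) true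
  let result := (pvPopLoop strList []).2
  let resultSorted := PySem.List.sorted result (fun x => x.1) false
  String.mk (resultSorted.foldl (fun answer r => answer ++ [r.1]) [])

-- ===== PORT B =====
def solution_alt (s : String) : String :=
  let counts : PySem.Dict Char Int :=
    s.toList.foldl (fun d w => d.insert w (d.getD w 0 + 1)) PySem.Dict.empty
  String.mk (PySem.List.sorted
    (counts.keys.filter (fun c => counts.getD c 0 == 1)) (fun c => c) false)

-- ===== PRECONDITION & SPEC =====
def Spec_solution (s : String) (out : String) : Prop := out = solution_alt s
instance (s : String) (out : String) : Decidable (Spec_solution s out) := by unfold Spec_solution; infer_instance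

-- ===== CLAIM (what is proved, stated in full; the proofs are below) =====
def Claim_equal_solution : Prop := ∀ (s : String), Dom_solution s → Spec_solution s (solution s)

-- ===== LEMMAS AND PROOFS =====

-- A's branching count loop builds exactly the Counter fold
theorem pv_countA_eq_counter (cs : List Char) :
    cs.foldl (fun d w =>
      if d.contains w = false then d.insert w 1 else d.modify w 0 (· + 1))
      PySem.Dict.empty = PySem.Dict.counter cs := by
  rw [PySem.Dict.counter_eq_foldl]
  congr 1; funext d w
  by_cases h : d.contains w = false
  · rw [h]
    simp only [if_true]
    rw [show d.modify w 0 (· + 1) = d.insert w (d.getD w 0 + 1) from rfl,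
        PySem.Dict.getD_of_not_contains d 0 h]
    norm_num
  · simp [h]

-- the pop loop collects exactly the reversed count==1 suffix of the count-descending list
theorem pv_popLoop_spec (L acc : List (Char × Int))
    (hp : L.Pairwise (fun a b => b.2 ≤ a.2)) (h1 : ∀ p ∈ L, 1 ≤ p.2) :
    (pvPopLoop L acc).2 = acc ++ (L.filter (fun p => p.2 == 1)).reverse := by
  induction L using List.reverseRecOn generalizing acc with
  | nil => simp [pvPopLoop]
  | append_singleton M a ih =>
    rw [pvPopLoop]
    split
    next h => simp at h
    next last h =>
    rw [List.getLast?_concat] at h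
    obtain rfl := Option.some.inj h
    rw [List.dropLast_concat]
    by_cases ha : a.2 == 1
    · rw [if_pos ha]
      have hpM : M.Pairwise (fun a b => b.2 ≤ a.2) := (List.pairwise_append.mp hp).1
      have h1M : ∀ p ∈ M, 1 ≤ p.2 := fun p hm => h1 p (List.mem_append_left _ hm)
      rw [ih (acc ++ [a]) hpM h1M, List.filter_append, List.filter_singleton]
      simp [ha]
    · rw [if_neg ha]
      have hnil : (M ++ [a]).filter (fun p => p.2 == 1) = [] := by
        rw [List.filter_eq_nil_iff]
        intro p hpmem
        have hale : a.2 ≤ p.2 := by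
          rcases List.mem_append.mp hpmem with hM | hA
          · exact (List.pairwise_append.mp hp).2.2 p hM a (List.mem_singleton_self a)
          · rw [List.mem_singleton.mp hA]
        have ha1 : a.2 ≠ 1 := by simpa using ha
        have ha2 : 1 ≤ a.2 := h1 a (List.mem_append_right _ (List.mem_singleton_self a))
        simp only [beq_iff_eq]
        omega
      rw [hnil]
      simp

-- ===== VERDICT (by name: the statement is the Claim_ definition above) =====
theorem solution_spec : Claim_equal_solution := by
  intro s _
  unfold Spec_solution solution solution_alt
  simp only [pv_countA_eq_counter, PySem.Dict.foldl_insert_getD_add_one_eq_counter]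
  set cs := s.toList with hcs
  set f : Char → Char × Int := fun k => (k, (cs.count k : Int)) with hf
  set K : List Char := (PySem.Set.ofList cs).filter (fun k => ((cs.count k : Int) == 1)) with hK
  set S : List Char := PySem.List.sorted K (fun c => c) false with hS
  -- facts about S
  have hKnodup : K.Nodup := (PySem.Set.nodup_ofList cs).filter _
  have hSperm : S.Perm K := PySem.List.sorted_perm K (fun c => c) false
  have hSnodup : S.Nodup := hSperm.nodup_iff.mpr hKnodup
  have hSle : S.Pairwise (fun a b => a ≤ b) := PySem.List.sorted_pairwise K (fun c => c)
  have hSlt : S.Pairwise (fun a b => a < b) :=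
    (hSle.and hSnodup).imp (fun h => lt_of_le_of_ne h.1 h.2)
  -- facts about A's sorted-by-count list L
  set L := PySem.List.sorted (PySem.Dict.counter cs).items (fun item => item.2) true with hL
  have hLperm : L.Perm (PySem.Dict.counter cs).items :=
    PySem.List.sorted_perm _ _ _
  have hLp : L.Pairwise (fun a b => b.2 ≤ a.2) :=
    PySem.List.sorted_pairwise_rev _ _
  have hL1 : ∀ p ∈ L, 1 ≤ p.2 := by
    intro p hm
    have : p ∈ (PySem.Dict.counter cs).items := hLperm.mem_iff.mp hm
    rw [PySem.Dict.items_counter] at this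
    obtain ⟨k, hk, rfl⟩ := List.mem_map.mp this
    have hkcs : k ∈ cs := (PySem.Set.mem_ofList cs k).mp hk
    have hpos : 0 < cs.count k := List.count_pos_iff.mpr hkcs
    show (1 : Int) ≤ (cs.count k : Int)
    exact_mod_cast hpos
  have hfilter : (PySem.Dict.counter cs).items.filter (fun p => p.2 == 1) = K.map f := by
    rw [PySem.Dict.items_counter, List.filter_map, hK, hf]
    rfl
  -- the pop loop's result is a permutation of K.map f
  have hres : (pvPopLoop L []).2 = (L.filter (fun p => p.2 == 1)).reverse := by
    simpa using pv_popLoop_spec L [] hLp hL1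
  have hresperm : (S.map f).Perm ((pvPopLoop L []).2) := by
    rw [hres]
    have hfl : (L.filter (fun p => p.2 == 1)).Perm (List.map f K) := by
      rw [← hfilter]; exact hLperm.filter _
    exact (hSperm.map f).trans ((List.reverse_perm _).trans hfl).symm
  have hzs : (S.map f).Pairwise (fun a b => a.1 < b.1) := by
    rw [List.pairwise_map]
    simpa [hf] using hSlt
  have hsortres : PySem.List.sorted ((pvPopLoop L []).2) (fun x => x.1) false = S.map f :=
    PySem.List.sorted_eq_of_perm_of_pairwise_lt _ _ _ hresperm hzs
  rw [hsortres, PySem.List.foldl_append_singleton_eq_map]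
  -- B's filtered key list is K
  have hBkeys : (PySem.Dict.counter cs).keys.filter
      (fun c => (PySem.Dict.counter cs).getD c 0 == 1) = K := by
    rw [hK, ← PySem.Dict.keys_counter]
    apply List.filter_congr
    intro c _
    rw [PySem.Dict.getD_counter]
  rw [hBkeys]
  congr 1
  rw [hf]
  simp only [List.nil_append, List.map_map]
  rw [show (Prod.fst ∘ fun k : Char => (k, (cs.count k : Int))) = fun k => k from rfl,
      List.map_id', hS]
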